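-- pv_equiv track=rewrite | github.com/Sujal-Khera/Bajaj-Hackathon | app.py | remove_identified_elements
-- ===== SOURCE A (Python) =====
-- MAX_LINES_TO_CHECK = 5
--
-- def remove_identified_elements(page_text: str, page_num: int,
--                                common_header_lines: set, common_footer_lines: set) -> str:
--     """Removes identified common header and footer lines from a page's text."""
--     if page_num == 1: return page_text
--     lines = [line.strip() for line in page_text.split('\n')]
--     final_lines = []
--     temp_lines = []
--     for i, line in enumerate(lines):
--         if line in common_header_lines and i < MAX_LINES_TO_CHECK: continue
--         else: temp_lines.append(line)
--     footer_check_start_index = max(0, len(temp_lines) - MAX_LINES_TO_CHECK)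
--     for i, line in enumerate(temp_lines):
--         if line in common_footer_lines and i >= footer_check_start_index: continue
--         else: final_lines.append(line)
--     return "\n".join(line for line in final_lines if line.strip() != "")
-- ===== SOURCE B (Python) =====
-- MAX_LINES_TO_CHECK = 5
--
-- def remove_identified_elements(page_text: str, page_num: int,
--                                common_header_lines: set, common_footer_lines: set) -> str:
--     """Single fused pass: instead of building an intermediate header-filtered list and
--     re-scanning it for footers and blanks, precompute the number of header removals h,
--     derive the footer window start arithmetically (len(lines) - h - 5), and decide
--     header/footer/blank survival for each line in one loop, tracking the line's
--     would-be index in the filtered list via a running 'removed' counter."""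
--     if page_num == 1:
--         return page_text
--     lines = [line.strip() for line in page_text.split('\n')]
--     h = sum(1 for l in lines[:MAX_LINES_TO_CHECK] if l in common_header_lines)
--     start = max(0, len(lines) - h - MAX_LINES_TO_CHECK)
--     out = []
--     removed = 0
--     for i, line in enumerate(lines):
--         if i < MAX_LINES_TO_CHECK and line in common_header_lines:
--             removed += 1
--             continue
--         if i - removed >= start and line in common_footer_lines:
--             continue
--         if line.strip() != "":
--             out.append(line)
--     return "\n".join(out)
-- ===== Notes on version B (the rewrite author's own statement) =====
-- stated objective: alternative
-- what changed: Replaces A's staged passes (build intermediate header-filtered temp_lines, rescan it for footers, then filter blanks) by one fused loop over the original lines: the footer window start is precomputed arithmetically from the header-removal count (len(lines)-h-5), and each line's would-be index in the filtered list is tracked with a running removed counter, so no intermediate list is ever built.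
import Mathlib
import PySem

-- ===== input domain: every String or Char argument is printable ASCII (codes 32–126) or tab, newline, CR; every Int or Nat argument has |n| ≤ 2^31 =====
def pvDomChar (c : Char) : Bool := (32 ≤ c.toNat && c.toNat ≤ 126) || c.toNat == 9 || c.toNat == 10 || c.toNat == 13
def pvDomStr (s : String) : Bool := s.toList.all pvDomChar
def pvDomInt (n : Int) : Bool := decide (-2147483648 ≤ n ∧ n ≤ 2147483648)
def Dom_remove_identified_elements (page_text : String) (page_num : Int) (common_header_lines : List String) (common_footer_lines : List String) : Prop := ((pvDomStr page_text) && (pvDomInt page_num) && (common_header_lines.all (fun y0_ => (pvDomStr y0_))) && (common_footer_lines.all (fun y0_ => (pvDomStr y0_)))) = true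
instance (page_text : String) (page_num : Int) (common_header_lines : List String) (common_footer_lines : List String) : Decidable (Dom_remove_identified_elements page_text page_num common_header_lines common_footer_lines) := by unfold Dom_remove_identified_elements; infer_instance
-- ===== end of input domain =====

-- B fuses A's three staged passes into one loop over the original lines, deriving the footer
-- window start arithmetically from the header-removal count instead of building temp_lines.

-- ===== PORT A =====
-- split? is none only for sep = ""; here sep = "\n", so .getD [] is exact
-- A's first for-loop: enumerate counter i, accumulator temp_lines
def pvAHeaderLoop (hs : List String) : Nat → List String → List String → List String
  | _, acc, [] => acc
  | i, acc, l :: rest =>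
    if l ∈ hs ∧ i < 5 then pvAHeaderLoop hs (i+1) acc rest
    else pvAHeaderLoop hs (i+1) (acc ++ [l]) rest

-- A's second for-loop: enumerate counter i, accumulator final_lines
def pvAFooterLoop (fs : List String) (start : Nat) : Nat → List String → List String → List String
  | _, acc, [] => acc
  | i, acc, l :: rest =>
    if l ∈ fs ∧ start ≤ i then pvAFooterLoop fs start (i+1) acc rest
    else pvAFooterLoop fs start (i+1) (acc ++ [l]) rest

def remove_identified_elements (page_text : String) (page_num : Int) (common_header_lines : List String) (common_footer_lines : List String) : String :=
  if page_num = 1 then page_text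
  else
    let lines := ((PySem.Str.split? page_text "\n").getD []).map PySem.Str.strip
    let temp_lines := pvAHeaderLoop common_header_lines 0 [] lines
    -- max(0, len(temp_lines) - 5) is Nat truncated subtraction
    let footer_check_start_index := temp_lines.length - 5
    let final_lines := pvAFooterLoop common_footer_lines footer_check_start_index 0 [] temp_lines
    PySem.Str.join "\n" (final_lines.filter (fun l => decide (PySem.Str.strip l ≠ "")))

-- ===== PORT B =====
-- B's single fused loop: i is the enumerate counter, removed the running header-removal count;
-- i - removed (Nat subtraction; removed ≤ i throughout, matching Python's int subtraction)
-- is the line's would-be index after header filtering.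
def pvBLoop (hs fs : List String) (start : Nat) : Nat → Nat → List String → List String
  | _, _, [] => []
  | i, removed, l :: rest =>
    if i < 5 ∧ l ∈ hs then pvBLoop hs fs start (i+1) (removed+1) rest
    else if start ≤ i - removed ∧ l ∈ fs then pvBLoop hs fs start (i+1) removed rest
    else if PySem.Str.strip l ≠ "" then l :: pvBLoop hs fs start (i+1) removed rest
    else pvBLoop hs fs start (i+1) removed rest

def remove_identified_elements_alt (page_text : String) (page_num : Int) (common_header_lines : List String) (common_footer_lines : List String) : String :=
  if page_num = 1 then page_text
  else
    let lines := ((PySem.Str.split? page_text "\n").getD []).map PySem.Str.strip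
    let h := (lines.take 5).countP (fun l => decide (l ∈ common_header_lines))
    -- max(0, len(lines) - h - 5) is Nat truncated subtraction
    let start := lines.length - h - 5
    PySem.Str.join "\n" (pvBLoop common_header_lines common_footer_lines start 0 0 lines)

-- ===== PRECONDITION & SPEC =====
def Spec_remove_identified_elements (page_text : String) (page_num : Int) (common_header_lines : List String) (common_footer_lines : List String) (out : String) : Prop := out = remove_identified_elements_alt page_text page_num common_header_lines common_footer_lines
instance (page_text : String) (page_num : Int) (common_header_lines : List String) (common_footer_lines : List String) (out : String) : Decidable (Spec_remove_identified_elements page_text page_num common_header_lines common_footer_lines out) := by unfold Spec_remove_identified_elements; infer_instance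

-- ===== CLAIM (what is proved, stated in full; the proofs are below) =====
def Claim_equal_remove_identified_elements : Prop := ∀ (page_text : String) (page_num : Int) (common_header_lines : List String) (common_footer_lines : List String), Dom_remove_identified_elements page_text page_num common_header_lines common_footer_lines → Spec_remove_identified_elements page_text page_num common_header_lines common_footer_lines (remove_identified_elements page_text page_num common_header_lines common_footer_lines)

-- ===== LEMMAS AND PROOFS =====

lemma pvAHeaderLoop_eq (hs : List String) (xs : List String) :
    ∀ (i : Nat) (acc : List String),
      pvAHeaderLoop hs i acc xs =
        acc ++ (xs.take (5 - i)).filter (fun l => decide (l ∉ hs)) ++ xs.drop (5 - i) := by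
  induction xs with
  | nil => intro i acc; simp [pvAHeaderLoop]
  | cons l rest ih =>
    intro i acc
    by_cases hi : i < 5
    · have h5 : 5 - i = (5 - (i+1)) + 1 := by omega
      by_cases hm : l ∈ hs
      · simp [pvAHeaderLoop, hm, hi, ih, h5]
      · simp [pvAHeaderLoop, hm, ih, h5]
    · have h5 : 5 - i = 0 := by omega
      have h5' : 5 - (i+1) = 0 := by omega
      simp [pvAHeaderLoop, hi, ih, h5, h5']

lemma pvAFooterLoop_eq (fs : List String) (start : Nat) (xs : List String) :
    ∀ (i : Nat) (acc : List String),
      pvAFooterLoop fs start i acc xs =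
        acc ++ xs.take (start - i) ++ (xs.drop (start - i)).filter (fun l => decide (l ∉ fs)) := by
  induction xs with
  | nil => intro i acc; simp [pvAFooterLoop]
  | cons l rest ih =>
    intro i acc
    by_cases hi : start ≤ i
    · have h0 : start - i = 0 := by omega
      have h0' : start - (i+1) = 0 := by omega
      by_cases hm : l ∈ fs
      · simp [pvAFooterLoop, hm, hi, ih, h0, h0']
      · simp [pvAFooterLoop, hm, ih, h0, h0']
    · have hs' : start - i = (start - (i+1)) + 1 := by omega
      simp [pvAFooterLoop, hi, ih, hs']

-- characterisation of B's fused loop: on the remaining suffix xs with counters i, removed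
-- (removed ≤ i), it produces the header-filtered list, footer-filtered from temp index
-- i - removed onward, with blank lines dropped.
lemma pvBLoop_eq (hs fs : List String) (start : Nat) (xs : List String) :
    ∀ (i removed : Nat), removed ≤ i →
      pvBLoop hs fs start i removed xs =
        (((((xs.take (5 - i)).filter (fun l => decide (l ∉ hs)) ++ xs.drop (5 - i)).take
              (start - (i - removed))) ++
          ((((xs.take (5 - i)).filter (fun l => decide (l ∉ hs)) ++ xs.drop (5 - i)).drop
              (start - (i - removed))).filter (fun l => decide (l ∉ fs)))).filter
          (fun l => decide (PySem.Str.strip l ≠ ""))) := by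
  induction xs with
  | nil => intro i removed _; simp [pvBLoop]
  | cons l rest ih =>
    intro i removed hri
    by_cases hhd : i < 5 ∧ l ∈ hs
    · -- header removal: l dropped, removed increments, temp index unchanged
      have h5 : 5 - i = (5 - (i+1)) + 1 := by omega
      have hj : (i+1) - (removed+1) = i - removed := by omega
      simp only [pvBLoop, if_pos hhd]
      rw [ih (i+1) (removed+1) (by omega), hj, h5]
      simp [hhd.2]
    · -- l survives the header filter
      have hj : (i+1) - removed = (i - removed) + 1 := by omega
      have hys : ((l :: rest).take (5 - i)).filter (fun x => decide (x ∉ hs)) ++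
            (l :: rest).drop (5 - i) =
          l :: ((rest.take (5 - (i+1))).filter (fun x => decide (x ∉ hs)) ++
            rest.drop (5 - (i+1))) := by
        by_cases hi : i < 5
        · have h5 : 5 - i = (5 - (i+1)) + 1 := by omega
          have hm : l ∉ hs := fun h => hhd ⟨hi, h⟩
          simp [h5, hm]
        · have h5 : 5 - i = 0 := by omega
          have h5' : 5 - (i+1) = 0 := by omega
          simp [h5, h5']
      simp only [pvBLoop, if_neg hhd]
      rw [ih (i+1) removed (by omega), hj, hys]
      by_cases hf : start ≤ i - removed ∧ l ∈ fs
      · have h0 : start - (i - removed) = 0 := by omega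
        have h0' : start - ((i - removed) + 1) = 0 := by omega
        rw [if_pos hf, h0, h0']
        simp [hf.2]
      · rw [if_neg hf]
        by_cases hlt : start ≤ i - removed
        · have hnf : l ∉ fs := fun h => hf ⟨hlt, h⟩
          have h0 : start - (i - removed) = 0 := by omega
          have h0' : start - ((i - removed) + 1) = 0 := by omega
          rw [h0, h0']
          by_cases hb : PySem.Str.strip l ≠ ""
          · rw [if_pos hb]; simp [hnf, hb]
          · rw [if_neg hb]; simp only [ne_eq, not_not] at hb; simp [hnf, hb]
        · have hsk : start - (i - removed) = (start - ((i - removed) + 1)) + 1 := by omega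
          rw [hsk]
          by_cases hb : PySem.Str.strip l ≠ ""
          · rw [if_pos hb]; simp [hb]
          · rw [if_neg hb]; simp only [ne_eq, not_not] at hb; simp [hb]

-- length of a filter with a negated predicate
lemma pv_len_aux (p : String → Bool) (ys : List String) :
    (ys.filter (fun l => !p l)).length = ys.length - ys.countP p := by
  induction ys with
  | nil => simp
  | cons l t ih =>
    have hle := List.countP_le_length (p := p) (l := t)
    by_cases hp : p l = true
    · simp [hp, ih]
    · simp only [Bool.not_eq_true] at hp
      simp [hp, ih]
      omega

-- length of the header-filtered list: len(lines) - h
lemma temp_length (hs : List String) (xs : List String) :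
    ((xs.take 5).filter (fun l => decide (l ∉ hs)) ++ xs.drop 5).length =
      xs.length - (xs.take 5).countP (fun l => decide (l ∈ hs)) := by
  have hle := List.countP_le_length (p := fun l => decide (l ∈ hs)) (l := xs.take 5)
  simp only [decide_not, List.length_append, pv_len_aux, List.length_drop,
    List.length_take] at *
  omega

-- ===== VERDICT (by name: the statement is the Claim_ definition above) =====
theorem remove_identified_elements_spec : Claim_equal_remove_identified_elements := by
  intro page_text page_num hs fs _dom
  unfold Spec_remove_identified_elements remove_identified_elements remove_identified_elements_alt
  by_cases h1 : page_num = 1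
  · simp [h1]
  · simp only [if_neg h1]
    rw [pvAHeaderLoop_eq, pvAFooterLoop_eq,
      pvBLoop_eq hs fs _ (((PySem.Str.split? page_text "\n").getD []).map PySem.Str.strip) 0 0
        (le_refl 0)]
    simp only [List.nil_append, Nat.sub_zero]
    rw [temp_length hs]
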